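-- pv_equiv track=rewrite | github.com/SantinoVicentini/LearningPython-utdt-exercises | peculiar.py | alterna_paridad
-- ===== SOURCE A (Python) =====
-- def alterna_paridad(x:int)->str:
--     num:str = str(x)
--     vr:str = ''
--     numAnterior:int = int(num[0]) % 2
--     if x < 10:
--         vr = 'si'
--
--     i:int = 1
--     while i < len(num):
--         if numAnterior != int(num[i]) % 2:
--             numAnterior = int(num[i]) % 2
--             i = i + 1
--             vr = 'si'
--         else:
--             vr = 'no'
--             break
--     return vr
-- ===== SOURCE B (Python) =====
-- def alterna_paridad(x: int) -> str:
--     # parity alternates iff digit-plus-index parity is the same at every position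
--     vals = {(int(c) + i) % 2 for i, c in enumerate(str(x))}
--     return 'si' if len(vals) <= 1 else 'no'
-- ===== Notes on version B (the rewrite author's own statement) =====
-- stated objective: idiomatic
-- what changed: A walks the digit string with a while loop carrying the previous digit's parity and a mutable result string, breaking at the first adjacent pair of equal parity; B builds, in one set comprehension over enumerate(str(x)), the set of per-position values (digit plus index, taken mod two) and answers 'si' iff that set has at most one element — no adjacent-pair comparison, no loop state.
import Mathlib
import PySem

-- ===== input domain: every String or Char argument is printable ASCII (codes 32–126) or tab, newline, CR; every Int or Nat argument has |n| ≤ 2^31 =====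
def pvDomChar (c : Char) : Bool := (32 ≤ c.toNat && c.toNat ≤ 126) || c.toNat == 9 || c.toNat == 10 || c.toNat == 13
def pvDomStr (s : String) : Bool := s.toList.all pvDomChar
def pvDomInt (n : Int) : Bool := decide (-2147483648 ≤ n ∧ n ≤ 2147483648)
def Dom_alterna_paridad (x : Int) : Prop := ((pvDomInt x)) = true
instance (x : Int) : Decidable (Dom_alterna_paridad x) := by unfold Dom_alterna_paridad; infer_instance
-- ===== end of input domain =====

-- B replaces A's stateful adjacent-pair while-loop by a set comprehension over per-position parities
-- (objective: idiomatic); the equivalence is about the return value; A raises on negative x (excluded by Pre_).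

-- ===== PORT A =====
-- A's while loop, on index i; int(num[i]) is ofChars? (none = ValueError, unreachable under Pre_)
def apLoop (num : List Char) (numAnterior : Int) (vr : String) (i : Nat) : String :=
  if i < num.length then
    let d := PySem.Int.mod ((PySem.Int.ofChars? [num.getD i ' ']).getD 0) 2
    if numAnterior ≠ d then
      apLoop num d "si" (i + 1)
    else "no"
  else vr
termination_by num.length - i

def alterna_paridad (x : Int) : String :=
  let num : List Char := PySem.Int.toChars x
  let vr : String := ""
  -- int(num[0]) raises ValueError for negative x (num[0] = '-'); such x are excluded by Pre_
  let numAnterior : Int := PySem.Int.mod ((PySem.Int.ofChars? [num.getD 0 ' ']).getD 0) 2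
  let vr : String := if x < 10 then "si" else vr
  apLoop num numAnterior vr 1

-- ===== PORT B =====
def alterna_paridad_alt (x : Int) : String :=
  let vals : PySem.Set Int := PySem.Set.ofList
    ((PySem.List.enumerate (PySem.Int.toChars x)).map
      (fun p => PySem.Int.mod (((PySem.Int.ofChars? [p.2]).getD 0) + p.1) 2))
  if vals.length ≤ 1 then "si" else "no"

-- ===== PRECONDITION & SPEC =====
-- Pre_ excludes exactly the negative x, where Python's int(str(x)[0]) = int('-') raises ValueError in A (and in B).
def Pre_alterna_paridad (x : Int) : Prop := 0 ≤ x
instance (x : Int) : Decidable (Pre_alterna_paridad x) := by unfold Pre_alterna_paridad; infer_instance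

def pvWitness_alterna_paridad : Int := 121

def Spec_alterna_paridad (x : Int) (out : String) : Prop := out = alterna_paridad_alt x
instance (x : Int) (out : String) : Decidable (Spec_alterna_paridad x out) := by unfold Spec_alterna_paridad; infer_instance

-- ===== CLAIM (what is proved, stated in full; the proofs are below) =====
def Claim_equal_alterna_paridad : Prop := ∀ (x : Int), Dom_alterna_paridad x → Pre_alterna_paridad x → Spec_alterna_paridad x (alterna_paridad x)

-- ===== LEMMAS AND PROOFS =====

-- parity value of one character, as A's loop computes it
def pvOf (c : Char) : Int := PySem.Int.mod ((PySem.Int.ofChars? [c]).getD 0) 2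

-- the value B assigns to an enumerated position
def gOf (p : Int × Char) : Int := PySem.Int.mod (((PySem.Int.ofChars? [p.2]).getD 0) + p.1) 2

-- the alternation predicate A's loop decides
def chainAlt : Int → List Int → Bool
  | _, [] => true
  | a, b :: t => (a != b) && chainAlt b t

theorem apLoop_eq_chain (num : List Char) (a : Int) (vr : String) (i : Nat) :
    apLoop num a vr i =
      if chainAlt a ((num.drop i).map pvOf) then (if num.length ≤ i then vr else "si") else "no" := by
  induction a, vr, i using apLoop.induct num with
  | case1 a vr i hlt d hne ih =>
    rw [apLoop]
    simp only [if_pos hlt, List.drop_eq_getElem_cons hlt, List.map_cons]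
    have hd : pvOf num[i] = d := by
      show pvOf num[i] = PySem.Int.mod ((PySem.Int.ofChars? [num.getD i ' ']).getD 0) 2
      simp [pvOf, List.getElem?_eq_getElem hlt]
    rw [if_pos hne, ih, hd]
    have hb : (a != d) = true := by simp [hne]
    by_cases hc : chainAlt d (List.map pvOf (List.drop (i+1) num)) = true
    · simp [chainAlt, hb, Nat.not_le.mpr hlt]
    · simp only [List.map_drop] at hc
      simp [chainAlt, hc, hb]
  | case2 a vr i hlt d heq =>
    rw [apLoop]
    simp only [if_pos hlt, List.drop_eq_getElem_cons hlt, List.map_cons]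
    have hd : pvOf num[i] = d := by
      show pvOf num[i] = PySem.Int.mod ((PySem.Int.ofChars? [num.getD i ' ']).getD 0) 2
      simp [pvOf, List.getElem?_eq_getElem hlt]
    rw [if_neg heq, hd]
    have heq' : a = d := not_not.mp heq
    simp [chainAlt, heq']
  | case3 a vr i hge =>
    rw [apLoop]
    rw [List.drop_eq_nil_of_le (Nat.le_of_not_lt hge)]
    simp [if_neg hge, chainAlt, Nat.le_of_not_lt hge]

theorem length_foldl_add_le (s : List Int) (l : List Int) :
    s.length ≤ (List.foldl PySem.Set.add s l).length := by
  induction l generalizing s with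
  | nil => simp
  | cons x l ih =>
    simp only [List.foldl_cons]
    refine le_trans ?_ (ih (PySem.Set.add s x))
    simp [PySem.Set.add]
    split_ifs <;> simp

theorem foldl_add_singleton_le_one (a : Int) (l : List Int) :
    (List.foldl PySem.Set.add [a] l).length ≤ 1 ↔ ∀ q ∈ l, q = a := by
  induction l with
  | nil => simp
  | cons x l ih =>
    simp only [List.foldl_cons]
    by_cases hx : x = a
    · subst hx
      have hadd : PySem.Set.add [x] x = [x] := by simp [PySem.Set.add, PySem.Set.contains]
      rw [hadd, ih]
      constructor
      · intro h q hq; rcases List.mem_cons.mp hq with rfl | h2; rfl; exact h q h2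
      · intro h q hq; exact h q (List.mem_cons_of_mem _ hq)
    · have hadd : PySem.Set.add [a] x = [a, x] := by simp [PySem.Set.add, PySem.Set.contains, hx]
      rw [hadd]
      have h2 := length_foldl_add_le [a, x] l
      simp only [List.length_cons, List.length_nil] at h2
      constructor
      · intro h; omega
      · intro h; exact absurd (h x (by simp)) hx

theorem chain_iff_enum (t : List Char) (c : Char) (i : Int) :
    (chainAlt (pvOf c) (t.map pvOf) = true) ↔
      ∀ q ∈ (PySem.List.enumerate t (i + 1)).map gOf, q = gOf (i, c) := by
  induction t generalizing c i with
  | nil => simp [chainAlt, PySem.List.enumerate_nil]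
  | cons c1 t ih =>
    rw [PySem.List.enumerate_cons]
    simp only [List.map_cons, List.mem_cons, chainAlt, Bool.and_eq_true, bne_iff_ne]
    have key : (gOf (i + 1, c1) = gOf (i, c)) ↔ pvOf c ≠ pvOf c1 := by
      simp only [gOf, pvOf, PySem.Int.mod_eq_emod_of_pos (by norm_num : (0:Int) < 2)]
      omega
    constructor
    · rintro ⟨hne, hch⟩ q hq
      rcases hq with rfl | hq
      · exact key.mpr hne
      · have := (ih c1 (i+1)).mp hch q hq
        rw [this, key.mpr hne]
    · intro h
      have h1 : gOf (i+1, c1) = gOf (i, c) := h _ (Or.inl rfl)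
      refine ⟨key.mp h1, ?_⟩
      exact (ih c1 (i+1)).mpr (fun q hq => by rw [h q (Or.inr hq), ← h1])

theorem toDigitsCore_zero (b n : Nat) (l : List Char) : Nat.toDigitsCore b 0 n l = l := rfl

theorem toDigitsCore_succ (b f n : Nat) (l : List Char) :
    Nat.toDigitsCore b (f+1) n l =
      if n / b = 0 then (n % b).digitChar :: l
      else Nat.toDigitsCore b f (n / b) ((n % b).digitChar :: l) := rfl

theorem toDigitsCore_acc_le (b : Nat) (f : Nat) (n : Nat) (l : List Char) :
    l.length ≤ (Nat.toDigitsCore b f n l).length := by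
  induction f generalizing n l with
  | zero => simp [toDigitsCore_zero]
  | succ f ih =>
    rw [toDigitsCore_succ]
    split
    · simp
    · exact le_trans (by simp) (ih _ _)

theorem toDigitsCore_acc_lt (b : Nat) (f : Nat) (n : Nat) (l : List Char) :
    l.length + 1 ≤ (Nat.toDigitsCore b (f+1) n l).length := by
  rw [toDigitsCore_succ]
  split
  · simp
  · exact le_trans (by simp) (toDigitsCore_acc_le b f _ _)

theorem two_le_toDigits (n : Nat) (h : 10 ≤ n) : 2 ≤ (Nat.toDigits 10 n).length := by
  rw [Nat.toDigits, toDigitsCore_succ, if_neg (by omega : ¬ n / 10 = 0)]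
  obtain ⟨f, hf⟩ : ∃ f, n = f + 1 := ⟨n - 1, by omega⟩
  rw [hf]
  exact le_trans (le_of_eq rfl) (toDigitsCore_acc_lt 10 f ((f+1)/10) [((f+1) % 10).digitChar])

-- ===== VERDICT (by name: the statement is the Claim_ definition above) =====
theorem alterna_paridad_spec : Claim_equal_alterna_paridad := by
  intro x _ hpre
  show alterna_paridad x = alterna_paridad_alt x
  have h0 : (0:Int) ≤ x := hpre
  by_cases hx : x < 10
  · have hone : PySem.Int.toChars x = [(x.toNat % 10).digitChar] := by
      simp [PySem.Int.toChars, show ¬ x < 0 by omega, Nat.toDigits, toDigitsCore_succ,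
        show x.toNat / 10 = 0 by omega]
    simp only [alterna_paridad, alterna_paridad_alt, hone]
    rw [apLoop_eq_chain, if_pos hx]
    simp [chainAlt, PySem.List.enumerate_cons, PySem.List.enumerate_nil,
      PySem.Set.ofList, PySem.Set.add]
  · have hnum : PySem.Int.toChars x = Nat.toDigits 10 x.toNat := by
      simp [PySem.Int.toChars, show ¬ x < 0 by omega]
    have hlen : 2 ≤ (PySem.Int.toChars x).length := by
      rw [hnum]; exact two_le_toDigits x.toNat (by omega)
    obtain ⟨c0, t, hct⟩ : ∃ c0 t, PySem.Int.toChars x = c0 :: t := by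
      rcases hnn : PySem.Int.toChars x with _ | ⟨c0, t⟩
      · rw [hnn] at hlen; simp at hlen
      · exact ⟨c0, t, rfl⟩
    have hlent : 1 ≤ t.length := by rw [hct] at hlen; simpa using hlen
    simp only [alterna_paridad, alterna_paridad_alt, hct]
    rw [if_neg hx, apLoop_eq_chain]
    have hg0 : (c0 :: t).getD 0 ' ' = c0 := rfl
    rw [hg0]
    have hA : PySem.Int.mod ((PySem.Int.ofChars? [c0]).getD 0) 2 = pvOf c0 := rfl
    rw [hA]
    -- B side
    rw [PySem.List.enumerate_cons]
    have hgfun : (fun p : Int × Char => PySem.Int.mod (((PySem.Int.ofChars? [p.2]).getD 0) + p.1) 2) = gOf := rfl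
    rw [hgfun, List.map_cons]
    have hofl : PySem.Set.ofList (gOf (0, c0) :: (PySem.List.enumerate t (0+1)).map gOf)
        = List.foldl PySem.Set.add [gOf (0, c0)] ((PySem.List.enumerate t (0+1)).map gOf) := rfl
    rw [hofl]
    have hiff : (chainAlt (pvOf c0) ((List.drop 1 (c0 :: t)).map pvOf) = true)
        ↔ (List.foldl PySem.Set.add [gOf (0, c0)] ((PySem.List.enumerate t (0+1)).map gOf)).length ≤ 1 := by
      rw [foldl_add_singleton_le_one]
      simpa using chain_iff_enum t c0 0
    by_cases hc : chainAlt (pvOf c0) ((List.drop 1 (c0 :: t)).map pvOf) = true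
    · rw [if_pos hc, if_pos (hiff.mp hc), if_neg (by simp only [List.length_cons]; omega)]
    · rw [if_neg hc, if_neg (by rw [← hiff]; exact hc)]
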